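-- pv_equiv track=rewrite | github.com/xiaolan20020118-create/Project-Roza | service/integrated_workflow.py | generate_favor_prompt
-- ===== SOURCE A (Python) =====
-- from typing import Dict, Any, Optional, Tuple, List
--
-- def generate_favor_prompt(prompts: List[str], split_points: List[int],
--                          favor_value: int) -> str:
--     """根据好感度值确定阶段提示词，使用分割点划分阶段。"""
--     # 清洗并排序分割点（严格递增）
--     valid_splits: List[int] = []
--     prev_val: Optional[int] = None
--     for split in split_points:
--         try:
--             split_int = int(split)
--         except (TypeError, ValueError):
--             continue
--         if prev_val is None or split_int > prev_val:
--             valid_splits.append(split_int)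
--             prev_val = split_int
--
--     # 至少一个提示词
--     if not prompts:
--         prompts = ["好感度系统正常"]
--
--     stage_count = len(valid_splits) + 1
--     if len(prompts) > stage_count:
--         prompts = prompts[:stage_count]
--     elif len(prompts) < stage_count:
--         prompts.extend([prompts[-1]] * (stage_count - len(prompts)))
--
--     # 根据分割点定位阶段
--     for idx, split_val in enumerate(valid_splits):
--         if favor_value < split_val:
--             return prompts[idx]
--     return prompts[len(valid_splits)]
-- ===== SOURCE B (Python) =====
-- def generate_favor_prompt(prompts, split_points, favor_value):
--     # Single fused pass, no intermediate cleaned list and no prompt padding/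
--     # truncation (A mutates the caller's prompts list via extend; B never
--     # mutates — equivalence is about the return value).
--     # A split survives A's cleaning pass iff it is a strict left-to-right
--     # record (greater than the running maximum of the splits seen so far),
--     # and the stage index is the number of such records <= favor_value.
--     if not prompts:
--         return "好感度系统正常"
--     idx = 0
--     m = None
--     for s in split_points:
--         try:
--             v = int(s)
--         except (TypeError, ValueError):
--             continue
--         if m is None or v > m:
--             if v <= favor_value:
--                 idx += 1
--         m = v if m is None else max(m, v)
--     return prompts[min(idx, len(prompts) - 1)]
-- ===== Notes on version B (the rewrite author's own statement) =====
-- stated objective: alternative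
-- what changed: B fuses everything into one pass: instead of A's three phases (build a cleaned split list, pad/truncate the prompts list, early-exit enumerate scan), B keeps only a running maximum and a counter of strict left-to-right records <= favor_value, then returns prompts[min(idx, len(prompts)-1)] with no intermediate list and no mutation (A mutates the caller's prompts via extend; equivalence is about the return value).
import Mathlib
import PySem

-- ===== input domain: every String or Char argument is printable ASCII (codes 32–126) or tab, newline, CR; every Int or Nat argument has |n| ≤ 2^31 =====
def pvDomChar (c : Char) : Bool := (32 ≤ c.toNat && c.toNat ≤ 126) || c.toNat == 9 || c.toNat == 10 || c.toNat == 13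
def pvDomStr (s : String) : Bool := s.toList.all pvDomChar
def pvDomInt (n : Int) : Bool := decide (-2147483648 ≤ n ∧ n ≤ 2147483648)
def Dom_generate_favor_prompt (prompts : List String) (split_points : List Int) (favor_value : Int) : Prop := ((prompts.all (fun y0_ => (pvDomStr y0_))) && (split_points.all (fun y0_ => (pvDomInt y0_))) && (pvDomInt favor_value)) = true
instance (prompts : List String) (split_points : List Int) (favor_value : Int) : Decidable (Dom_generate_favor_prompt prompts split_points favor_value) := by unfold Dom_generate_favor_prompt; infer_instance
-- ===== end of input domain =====

-- B is one fused pass (running maximum + record counter, no cleaned list, no prompt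
-- padding); A also mutates the caller's prompts list via extend — equivalence is about
-- the return value only, B performs no mutation.

-- ===== PORT A =====
-- the cleaning loop: state (valid_splits, prev_val)
def pvCleanA (split_points : List Int) : List Int × Option Int :=
  split_points.foldl (fun acc split =>
    -- int(split) on an Int is the identity and never raises
    match acc.2 with
    | none => (acc.1 ++ [split], some split)
    | some p => if split > p then (acc.1 ++ [split], some split) else acc)
    ([], none)

-- the final 'for idx, split_val in enumerate(valid_splits)' loop
def pvLookupA (prompts : List String) (vs : List Int) (idx : Nat) (favor : Int) : String :=
  match vs with
  | [] => (PySem.List.pyGet? prompts (idx : Int)).getD ""   -- prompts[len(valid_splits)]; always in range here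
  | v :: rest =>
      if favor < v then (PySem.List.pyGet? prompts (idx : Int)).getD ""
      else pvLookupA prompts rest (idx + 1) favor

def generate_favor_prompt (prompts : List String) (split_points : List Int) (favor_value : Int) : String :=
  let valid_splits := (pvCleanA split_points).1
  let prompts1 := if prompts.isEmpty then ["好感度系统正常"] else prompts
  let stage_count := valid_splits.length + 1
  let prompts2 :=
    if prompts1.length > stage_count then
      PySem.List.slice prompts1 none (some (stage_count : Int))   -- prompts[:stage_count]
    else if prompts1.length < stage_count then
      prompts1 ++ List.replicate (stage_count - prompts1.length)
        ((PySem.List.pyGet? prompts1 (-1)).getD "")   -- prompts[-1]; prompts1 nonempty, in range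
    else prompts1
  pvLookupA prompts2 valid_splits 0 favor_value

-- ===== PORT B =====
-- B's single loop: state (idx, m) — record counter and running maximum
def pvStageB (split_points : List Int) (favor : Int) : Nat × Option Int :=
  split_points.foldl (fun acc v =>
    ((match acc.2 with
      | none => if v ≤ favor then acc.1 + 1 else acc.1
      | some m => if v > m then (if v ≤ favor then acc.1 + 1 else acc.1) else acc.1),
     (match acc.2 with
      | none => some v
      | some m => some (max m v))))
    (0, none)

def generate_favor_prompt_alt (prompts : List String) (split_points : List Int) (favor_value : Int) : String :=
  if prompts.isEmpty then "好感度系统正常"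
  else
    let idx := (pvStageB split_points favor_value).1
    (PySem.List.pyGet? prompts (min (idx : Int) ((prompts.length : Int) - 1))).getD ""

-- ===== PRECONDITION & SPEC =====
def Spec_generate_favor_prompt (prompts : List String) (split_points : List Int) (favor_value : Int) (out : String) : Prop := out = generate_favor_prompt_alt prompts split_points favor_value
instance (prompts : List String) (split_points : List Int) (favor_value : Int) (out : String) : Decidable (Spec_generate_favor_prompt prompts split_points favor_value out) := by unfold Spec_generate_favor_prompt; infer_instance

-- ===== CLAIM (what is proved, stated in full; the proofs are below) =====
def Claim_equal_generate_favor_prompt : Prop := ∀ (prompts : List String) (split_points : List Int) (favor_value : Int), Dom_generate_favor_prompt prompts split_points favor_value → Spec_generate_favor_prompt prompts split_points favor_value (generate_favor_prompt prompts split_points favor_value)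

-- ===== LEMMAS AND PROOFS =====

-- proof-only helper: A's cleaning fold expressed against the list's own last element
def pvCleanL (split_points : List Int) : List Int :=
  split_points.foldl (fun vs v =>
    match vs.getLast? with
    | none => vs ++ [v]
    | some l => if v > l then vs ++ [v] else vs) []

-- the two cleaning folds agree: A's prev_val is exactly the last element of the list so far
theorem pvClean_eq_aux (sp : List Int) (vs : List Int) :
    (sp.foldl (fun acc split =>
      match acc.2 with
      | none => (acc.1 ++ [split], some split)
      | some p => if split > p then (acc.1 ++ [split], some split) else acc)
      (vs, vs.getLast?)).1
    = sp.foldl (fun vs v =>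
        match vs.getLast? with
        | none => vs ++ [v]
        | some l => if v > l then vs ++ [v] else vs) vs := by
  induction sp generalizing vs with
  | nil => rfl
  | cons s rest ih =>
      simp only [List.foldl_cons]
      cases h : vs.getLast? with
      | none =>
          have : (vs ++ [s]).getLast? = some s := by simp
          rw [show (some s) = (vs ++ [s]).getLast? from this.symm, ih]
      | some p =>
          by_cases hs : s > p
          · simp only [hs, if_pos]
            have : (vs ++ [s]).getLast? = some s := by simp
            rw [show (some s) = (vs ++ [s]).getLast? from this.symm, ih]
          · simp only [hs, if_neg, not_false_iff]
            rw [show (some p) = vs.getLast? from h.symm, ih]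

theorem pvClean_eq (sp : List Int) : (pvCleanA sp).1 = pvCleanL sp := by
  have := pvClean_eq_aux sp []
  simpa [pvCleanA, pvCleanL] using this

-- the cleaned list is strictly increasing (pairwise <)
theorem pvCleanL_sorted_aux (sp : List Int) (vs : List Int) (h : vs.Pairwise (· < ·)) :
    (sp.foldl (fun vs v =>
        match vs.getLast? with
        | none => vs ++ [v]
        | some l => if v > l then vs ++ [v] else vs) vs).Pairwise (· < ·) := by
  induction sp generalizing vs with
  | nil => simpa using h
  | cons s rest ih =>
      simp only [List.foldl_cons]
      cases hl : vs.getLast? with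
      | none =>
          have hvnil : vs = [] := List.getLast?_eq_none_iff.mp hl
          subst hvnil
          exact ih [s] (by simp)
      | some p =>
          by_cases hs : s > p
          · simp only [hs, if_pos]
            apply ih
            have hvne : vs ≠ [] := by
              intro hc; subst hc; simp at hl
            rw [List.pairwise_append]
            refine ⟨h, by simp, ?_⟩
            intro a ha b hb
            simp at hb; subst hb
            have hlast : vs.getLast hvne = p := by
              have := List.getLast?_eq_some_getLast (l := vs) hvne
              rw [hl] at this; exact (Option.some_injective _ this.symm)
            rcases eq_or_ne a (vs.getLast hvne) with hae | hane
            · rw [hae, hlast]; exact hs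
            · have hmem : vs.getLast hvne ∈ vs := List.getLast_mem hvne
              have hsplit : vs = vs.dropLast ++ [vs.getLast hvne] := (List.dropLast_concat_getLast hvne).symm
              have hpa : (vs.dropLast ++ [vs.getLast hvne]).Pairwise (· < ·) := by rw [← hsplit]; exact h
              rw [List.pairwise_append] at hpa
              have hadl : a ∈ vs.dropLast := by
                rcases List.mem_append.mp (by rw [← hsplit]; exact ha) with h1 | h1
                · exact h1
                · simp at h1; exact absurd h1 hane
              have : a < vs.getLast hvne := hpa.2.2 a hadl _ (by simp)
              rw [hlast] at this; omega
          · simpa [hs] using ih vs h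

theorem pvCleanA_sorted (sp : List Int) : (pvCleanA sp).1.Pairwise (· < ·) := by
  rw [pvClean_eq]
  exact pvCleanL_sorted_aux sp [] (by simp)

-- B's fused fold simulates A's cleaning fold: idx = number of kept splits ≤ favor, m = prev_val
theorem pvStage_eq_aux (sp : List Int) (favor : Int) (vs : List Int) (p : Option Int)
    (hp0 : p = none → vs = []) (hp : ∀ l, p = some l → ∀ a ∈ vs, a ≤ l) :
    sp.foldl (fun acc v =>
      ((match acc.2 with
        | none => if v ≤ favor then acc.1 + 1 else acc.1
        | some m => if v > m then (if v ≤ favor then acc.1 + 1 else acc.1) else acc.1),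
       (match acc.2 with
        | none => some v
        | some m => some (max m v))))
      ((vs.filter (fun v => v ≤ favor)).length, p)
    = (let r := sp.foldl (fun acc split =>
        match acc.2 with
        | none => (acc.1 ++ [split], some split)
        | some q => if split > q then (acc.1 ++ [split], some split) else acc)
        (vs, p);
       ((r.1.filter (fun v => v ≤ favor)).length, r.2)) := by
  induction sp generalizing vs p with
  | nil => rfl
  | cons s rest ih =>
      simp only [List.foldl_cons]
      cases p with
      | none =>
          have hvnil : vs = [] := hp0 rfl
          subst hvnil
          have := ih [s] (some s) (by intro h; cases h)
            (by intro l hl a ha; cases hl; simp at ha; omega)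
          simp only [List.filter_cons] at this
          by_cases hsf : s ≤ favor
          · simpa [hsf] using this
          · simpa [hsf] using this
      | some q =>
          by_cases hs : s > q
          · have := ih (vs ++ [s]) (some s) (by intro h; cases h)
              (by intro l hl a ha; cases hl
                  rcases List.mem_append.mp ha with h1 | h1
                  · have := hp q rfl a h1; omega
                  · simp at h1; omega)
            simp only [List.filter_append, List.length_append] at this
            have hmax : max q s = s := by omega
            by_cases hsf : s ≤ favor
            · simpa [hs, hsf, hmax] using this
            · simpa [hs, hsf, hmax] using this
          · have hmax : max q s = q := by omega
            have := ih vs (some q) (by intro h; cases h) hp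
            simpa [hs, hmax] using this

theorem pvStage_eq (sp : List Int) (favor : Int) :
    (pvStageB sp favor).1 = (((pvCleanA sp).1).filter (fun v => v ≤ favor)).length := by
  have h := pvStage_eq_aux sp favor [] none (fun _ => rfl) (by intro l hl; cases hl)
  have h1 := congrArg Prod.fst h
  simpa [pvStageB, pvCleanA] using h1

-- A's scan over a strictly increasing vs lands at offset countP (· ≤ favor)
theorem pvLookupA_eq_count (prompts : List String) (vs : List Int) (k : Nat) (favor : Int)
    (h : vs.Pairwise (· < ·)) :
    pvLookupA prompts vs k favor
      = (PySem.List.pyGet? prompts ((k + (vs.filter (fun v => v ≤ favor)).length : Nat) : Int)).getD "" := by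
  induction vs generalizing k with
  | nil => simp [pvLookupA]
  | cons v rest ih =>
      rw [List.pairwise_cons] at h
      by_cases hf : favor < v
      · have hrest : rest.filter (fun x => decide (x ≤ favor)) = [] := by
          apply List.filter_eq_nil_iff.mpr
          intro a ha
          have : v < a := h.1 a ha
          simp; omega
        simp only [pvLookupA, if_pos hf, List.filter_cons]
        have hnv : ¬ (decide (v ≤ favor) = true) := by simp; omega
        simp only [hnv, hrest]
        rfl
      · have hv : v ≤ favor := by omega
        simp only [pvLookupA, if_neg hf]
        rw [ih (k + 1) h.2]
        congr 2
        simp [hv]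
        ring

-- indexing the padded/truncated list equals clamped indexing of the original
theorem pvPad_get (ps : List String) (n j : Nat) (hps : ps ≠ []) (hj : j ≤ n) :
    (PySem.List.pyGet? (
      if ps.length > n + 1 then PySem.List.slice ps none (some ((n + 1 : Nat) : Int))
      else if ps.length < n + 1 then ps ++ List.replicate (n + 1 - ps.length) ((PySem.List.pyGet? ps (-1)).getD "")
      else ps) ((j : Nat) : Int)).getD ""
    = (PySem.List.pyGet? ps (min ((j : Nat) : Int) ((ps.length : Int) - 1))).getD "" := by
  have hlen : 0 < ps.length := List.length_pos_iff.mpr hps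
  by_cases h1 : ps.length > n + 1
  · simp only [if_pos h1]
    rw [PySem.List.slice_to_natCast]
    have hmin : min ((j:Nat):Int) ((ps.length : Int) - 1) = ((j:Nat):Int) := by
      omega
    rw [hmin, PySem.List.pyGet?_natCast, PySem.List.pyGet?_natCast]
    rw [List.getElem?_take_of_lt (by omega)]
  · simp only [if_neg h1]
    by_cases h2 : ps.length < n + 1
    · simp only [if_pos h2]
      rw [PySem.List.pyGet?_neg_one]
      rw [PySem.List.pyGet?_natCast]
      by_cases hjl : j < ps.length
      · have hmin : min ((j:Nat):Int) ((ps.length : Int) - 1) = ((j:Nat):Int) := by omega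
        rw [hmin, PySem.List.pyGet?_natCast]
        rw [List.getElem?_append_left hjl]
      · have hmin : min ((j:Nat):Int) ((ps.length : Int) - 1) = ((ps.length : Int) - 1) := by omega
        rw [hmin]
        have : ((ps.length : Int) - 1) = (((ps.length - 1 : Nat)) : Int) := by omega
        rw [this, PySem.List.pyGet?_natCast]
        have hgl : ps.getLast? = some (ps.getLast hps) := List.getLast?_eq_some_getLast hps
        rw [hgl]
        have hidx : j - ps.length < n + 1 - ps.length := by omega
        rw [List.getElem?_append_right (by omega)]
        rw [List.getElem?_replicate]
        simp only [hidx, if_pos]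
        rw [List.getElem?_eq_getElem (by omega)]
        simp [List.getLast_eq_getElem]
    · have heq : ps.length = n + 1 := by omega
      simp only [if_neg h2]
      have hmin : min ((j:Nat):Int) ((ps.length : Int) - 1) = ((j:Nat):Int) := by omega
      rw [hmin]

-- ===== VERDICT (by name: the statement is the Claim_ definition above) =====
theorem generate_favor_prompt_spec : Claim_equal_generate_favor_prompt := by
  intro prompts split_points favor_value _
  unfold Spec_generate_favor_prompt generate_favor_prompt generate_favor_prompt_alt
  simp only []
  set vs := (pvCleanA split_points).1 with hvs
  have hsorted : vs.Pairwise (· < ·) := pvCleanA_sorted split_points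
  have hstage : (pvStageB split_points favor_value).1
      = (vs.filter (fun v => v ≤ favor_value)).length := pvStage_eq split_points favor_value
  by_cases hpe : prompts.isEmpty
  · have hpnil : prompts = [] := List.isEmpty_iff.mp hpe
    subst hpnil
    simp only [hpe, if_pos]
    rw [pvLookupA_eq_count _ _ _ _ hsorted]
    have := pvPad_get ["好感度系统正常"] vs.length
      ((vs.filter (fun v => v ≤ favor_value)).length)
      (by simp) (by simpa using List.length_filter_le _ _)
    simp only [Nat.zero_add] at this ⊢
    rw [this]
    have hmin : min (((vs.filter (fun v => v ≤ favor_value)).length : Int))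
        (((["好感度系统正常"] : List String).length : Int) - 1) = 0 := by
      simp
    rw [hmin]
    rfl
  · have hpnil : prompts ≠ [] := by
      intro hc; subst hc; simp at hpe
    simp only [hpe, if_neg, Bool.false_eq_true, not_false_iff]
    rw [pvLookupA_eq_count _ _ _ _ hsorted, hstage]
    have := pvPad_get prompts vs.length
      ((vs.filter (fun v => v ≤ favor_value)).length)
      hpnil (by simpa using List.length_filter_le _ _)
    simp only [Nat.zero_add] at this ⊢
    rw [this]
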